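-- pv_equiv track=rewrite | github.com/dsipakou/codewars | odd_out.py | odd_out
-- ===== SOURCE A (Python) =====
-- def odd_out(s):
--     output = []
--     i = len(s) - 1
--     while i >= 0:
--         current = s[i]
--         if s.count(current) % 2 == 1 and current not in output:
--             output.append(current)
--         i -= 1
--     return output[::-1]
-- ===== SOURCE B (Python) =====
-- def odd_out(s):
--     out = []
--     for c in s:
--         try:
--             out.remove(c)
--         except ValueError:
--             out.append(c)
--     return out
-- ===== Notes on version B (the rewrite author's own statement) =====
-- stated objective: faster
-- what changed: Replaces A's backward scan with repeated s.count and an output-membership dedup (then reverse) by a single forward toggle pass: each occurrence of a character removes it from the accumulator if present, else appends it, so the final accumulator is exactly the odd-count characters ordered by last occurrence, with no counting and no reversal.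
import Mathlib
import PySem

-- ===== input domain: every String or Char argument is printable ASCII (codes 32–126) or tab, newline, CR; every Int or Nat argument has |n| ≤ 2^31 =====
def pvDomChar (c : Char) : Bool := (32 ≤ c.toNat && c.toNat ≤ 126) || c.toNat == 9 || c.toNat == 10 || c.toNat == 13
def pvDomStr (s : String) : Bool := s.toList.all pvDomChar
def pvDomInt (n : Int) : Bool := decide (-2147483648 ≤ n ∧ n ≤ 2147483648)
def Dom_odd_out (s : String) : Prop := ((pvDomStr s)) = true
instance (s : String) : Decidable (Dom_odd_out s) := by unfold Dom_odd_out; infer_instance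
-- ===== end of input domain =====

-- B replaces A's backward scan (repeated s.count and an output-membership dedup, then reverse)
-- by a single forward toggle pass: each occurrence removes the character from the accumulator
-- if present, else appends it; no counting is performed.

-- ===== PORT A =====
-- while i >= 0: current = s[i]; if s.count(current) % 2 == 1 and current not in output: output.append(current); i -= 1
-- (fuel n+1 means i = n; the index is always in range, so getD's default is never used;
--  s.count(current) for a 1-char string equals the character count — exact here)
def oddOutLoop (cs : List Char) : Nat → List String → List String
  | 0, output => output
  | n+1, output =>
    let current := cs.getD n ' '
    let output' :=
      if cs.count current % 2 == 1 && !(output.contains (String.ofList [current]))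
      then output ++ [String.ofList [current]] else output
    oddOutLoop cs n output'

def odd_out (s : String) : List String :=
  let cs := s.toList
  (oddOutLoop cs cs.length []).reverse  -- output[::-1]

-- ===== PORT B =====
-- out = []; for c in s: try: out.remove(c) except ValueError: out.append(c); return out
-- (out.remove(c) raises ValueError iff c not in out: PySem.List.remove? returns none exactly there)
def toggleStepS (out : List String) (c : Char) : List String :=
  match PySem.List.remove? out (String.ofList [c]) with
  | some l => l                           -- out.remove(c) succeeded
  | none => out ++ [String.ofList [c]]    -- except ValueError: out.append(c)

def odd_out_alt (s : String) : List String :=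
  s.toList.foldl toggleStepS []

-- ===== PRECONDITION & SPEC =====
def Spec_odd_out (s : String) (out : List String) : Prop := out = odd_out_alt s
instance (s : String) (out : List String) : Decidable (Spec_odd_out s out) := by unfold Spec_odd_out; infer_instance

-- ===== CLAIM (what is proved, stated in full; the proofs are below) =====
def Claim_equal_odd_out : Prop := ∀ (s : String), Dom_odd_out s → Spec_odd_out s (odd_out s)

-- ===== LEMMAS AND PROOFS =====

-- ---- shared vocabulary ----

-- A's loop body as a fold step
def oddStep (cs : List Char) (out : List String) (c : Char) : List String :=
  if cs.count c % 2 == 1 && !(out.contains (String.ofList [c])) then out ++ [String.ofList [c]] else out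

-- output as a function of the set of characters seen so far
def toOut (cs : List Char) (seen : List Char) : List String :=
  (seen.filter (fun c => cs.count c % 2 == 1)).map (fun c => String.ofList [c])

-- char-level toggle step and the canonical form both ports reach:
-- distinct chars of p ordered by last occurrence (D), filtered to odd count (F)
def toggleStep (out : List Char) (c : Char) : List Char :=
  match PySem.List.remove? out c with
  | some l => l
  | none => out ++ [c]

def lastOrder (p : List Char) : List Char := (PySem.Set.ofList p.reverse).reverse

def oddOf (p : List Char) : List Char :=
  (lastOrder p).filter (fun c => p.count c % 2 == 1)

theorem ofList_singleton_inj (a c : Char) : String.ofList [a] = String.ofList [c] ↔ a = c := by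
  constructor
  · intro h
    have := congrArg String.toList h
    simp only [String.toList_ofList] at this
    exact List.singleton_inj.mp this
  · intro h; rw [h]

-- ---- A-side: the backward loop builds toOut over the seen-set ----

theorem mem_toOut (cs seen : List Char) (c : Char) :
    (String.ofList [c] ∈ toOut cs seen) ↔ (c ∈ seen ∧ cs.count c % 2 == 1) := by
  simp only [toOut, List.mem_map, List.mem_filter]
  constructor
  · rintro ⟨a, ⟨ha, hodd⟩, heq⟩
    obtain rfl := (ofList_singleton_inj a c).mp heq
    exact ⟨ha, by simpa using hodd⟩
  · rintro ⟨ha, hodd⟩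
    exact ⟨c, ⟨ha, by simpa using hodd⟩, rfl⟩

theorem loop_eq_foldl (cs : List Char) :
    ∀ n, n ≤ cs.length → ∀ out,
      oddOutLoop cs n out = ((cs.take n).reverse).foldl (oddStep cs) out := by
  intro n
  induction n with
  | zero => intro _ out; simp [oddOutLoop]
  | succ n ih =>
    intro h out
    have hn : n < cs.length := by omega
    have hget : cs.getD n ' ' = cs[n] := List.getD_eq_getElem cs ' ' hn
    have htake : cs.take (n+1) = cs.take n ++ [cs[n]] := by
      rw [List.take_add_one, List.getElem?_eq_getElem hn]; rfl
    rw [htake]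
    simp only [List.reverse_append, List.reverse_singleton, List.singleton_append,
      List.foldl_cons]
    rw [show oddOutLoop cs (n+1) out = oddOutLoop cs n (oddStep cs out (cs.getD n ' ')) from rfl,
      hget, ih (by omega)]

theorem step_toOut (cs seen : List Char) (c : Char) :
    oddStep cs (toOut cs seen) c = toOut cs (PySem.Set.add seen c) := by
  unfold oddStep PySem.Set.add
  by_cases hmem : c ∈ seen
  · by_cases hodd : cs.count c % 2 == 1
    · have hin : String.ofList [c] ∈ toOut cs seen := (mem_toOut cs seen c).2 ⟨hmem, hodd⟩
      simp [PySem.Set.contains, hmem, hodd, hin]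
    · simp [PySem.Set.contains, hmem, hodd]
  · have hnot : String.ofList [c] ∉ toOut cs seen := fun h => hmem ((mem_toOut cs seen c).1 h).1
    by_cases hodd : cs.count c % 2 == 1
    · simp [PySem.Set.contains, hmem, hodd, toOut, List.filter_append]
      intro x hx _ heq
      exact hmem ((ofList_singleton_inj x c).mp heq ▸ hx)
    · simp [PySem.Set.contains, hmem, hodd, toOut, List.filter_append]

theorem foldl_step_eq (cs : List Char) :
    ∀ (p seen : List Char),
      p.foldl (oddStep cs) (toOut cs seen) = toOut cs (PySem.Set.update seen p) := by
  intro p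
  induction p with
  | nil => intro seen; simp [PySem.Set.update]
  | cons c p ih =>
    intro seen
    rw [List.foldl_cons, step_toOut cs seen c]
    rw [ih (PySem.Set.add seen c)]
    rfl

theorem odd_out_eq_oddOf (s : String) :
    odd_out s = (oddOf s.toList).map (fun c => String.ofList [c]) := by
  unfold odd_out
  set cs := s.toList with hcs
  have hA : oddOutLoop cs cs.length [] = toOut cs (PySem.Set.ofList cs.reverse) := by
    rw [loop_eq_foldl cs cs.length (le_refl _) [], List.take_length]
    have h0 : ([] : List String) = toOut cs [] := by simp [toOut]
    rw [h0, foldl_step_eq cs cs.reverse []]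
    rfl
  simp only [hA, toOut, oddOf, lastOrder, List.filter_reverse, List.map_reverse]

-- ---- B-side: the toggle fold builds oddOf ----

theorem lastOrder_append (p : List Char) (c : Char) :
    lastOrder (p ++ [c]) = (lastOrder p).filter (fun x => !(x == c)) ++ [c] := by
  unfold lastOrder
  rw [List.reverse_append, List.reverse_singleton, List.singleton_append,
    PySem.Set.ofList_cons]
  simp [PySem.Set.discard, List.filter_reverse]

theorem count_append_singleton (p : List Char) (c x : Char) :
    (p ++ [c]).count x = p.count x + (if x = c then 1 else 0) := by
  rw [List.count_append, List.count_singleton]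
  by_cases h : x = c
  · simp [h]
  · simp [h]
    exact fun hh => h hh.symm

theorem nodup_lastOrder (p : List Char) : (lastOrder p).Nodup :=
  List.nodup_reverse.2 (PySem.Set.nodup_ofList p.reverse)

theorem mem_lastOrder (p : List Char) (c : Char) : c ∈ lastOrder p ↔ c ∈ p := by
  unfold lastOrder
  simp [PySem.Set.mem_ofList]

theorem mem_oddOf (p : List Char) (c : Char) :
    c ∈ oddOf p ↔ (c ∈ p ∧ p.count c % 2 = 1) := by
  unfold oddOf
  simp [List.mem_filter, mem_lastOrder]

theorem nodup_oddOf (p : List Char) : (oddOf p).Nodup :=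
  (nodup_lastOrder p).filter _

theorem toggle_invariant (p : List Char) (c : Char) :
    toggleStep (oddOf p) c = oddOf (p ++ [c]) := by
  have htarget : oddOf (p ++ [c]) =
      (oddOf p).filter (fun x => !(x == c)) ++
        (if (p.count c + 1) % 2 == 1 then [c] else []) := by
    unfold oddOf
    rw [lastOrder_append, List.filter_append]
    congr 1
    · rw [List.filter_filter, List.filter_filter]
      apply List.filter_congr
      intro x _
      by_cases hx : x = c
      · simp [hx]
      · have hcount : (p ++ [c]).count x = p.count x := by
          rw [count_append_singleton]; simp [hx]
        simp [hcount, Bool.and_comm]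
    · rw [List.filter_singleton]
      have : (p ++ [c]).count c = p.count c + 1 := by
        rw [count_append_singleton]; simp
      simp [this]
  by_cases hmem : c ∈ oddOf p
  · -- c currently in the accumulator: remove it; its count becomes even
    have hodd : p.count c % 2 = 1 := ((mem_oddOf p c).1 hmem).2
    have heven : ((p.count c + 1) % 2 == 1) = false := by simp; omega
    rw [htarget, heven]
    unfold toggleStep
    rw [PySem.List.remove?_eq_some_erase _ _ hmem]
    simp only [List.append_nil, if_neg (by simp : ¬(false = true))]
    exact (nodup_oddOf p).erase_eq_filter c
  · -- c not in the accumulator: its count in p is even; append it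
    have heven : p.count c % 2 = 0 := by
      by_contra h
      have h1 : p.count c % 2 = 1 := by omega
      have hc : c ∈ p := by rw [← List.count_pos_iff]; omega
      exact hmem ((mem_oddOf p c).2 ⟨hc, h1⟩)
    have hodd' : (((p.count c + 1) % 2 == 1) : Bool) = true := by simp; omega
    have hnofilter : (oddOf p).filter (fun x => !(x == c)) = oddOf p := by
      apply List.filter_eq_self.2
      intro x hx
      have hxc : x ≠ c := fun h => hmem (h ▸ hx)
      simp [hxc]
    rw [htarget, hodd', hnofilter]
    unfold toggleStep
    rw [(PySem.List.remove?_eq_none_iff _ _).2 hmem]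
    simp

theorem toggle_foldl (p : List Char) : p.foldl toggleStep [] = oddOf p := by
  induction p using List.reverseRecOn with
  | nil => rfl
  | append_singleton p c ih =>
    rw [List.foldl_append, List.foldl_cons, List.foldl_nil, ih, toggle_invariant]

-- lifting the char-level fold to the string-level port
theorem toggleStepS_map (out : List Char) (c : Char) :
    toggleStepS (out.map (fun c => String.ofList [c])) c
      = (toggleStep out c).map (fun c => String.ofList [c]) := by
  unfold toggleStepS toggleStep
  by_cases hmem : c ∈ out
  · have hmemS : String.ofList [c] ∈ out.map (fun c => String.ofList [c]) :=
      List.mem_map.2 ⟨c, hmem, rfl⟩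
    rw [PySem.List.remove?_eq_some_erase _ _ hmem, PySem.List.remove?_eq_some_erase _ _ hmemS]
    simp only []
    exact (List.map_erase (fun a b hab => (ofList_singleton_inj a b).1 hab) out).symm
  · have hmemS : String.ofList [c] ∉ out.map (fun c => String.ofList [c]) := by
      intro h
      obtain ⟨a, ha, heq⟩ := List.mem_map.1 h
      exact hmem ((ofList_singleton_inj a c).1 heq ▸ ha)
    rw [(PySem.List.remove?_eq_none_iff _ _).2 hmem, (PySem.List.remove?_eq_none_iff _ _).2 hmemS]
    simp

theorem foldlS_eq_map (p : List Char) :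
    ∀ out, p.foldl toggleStepS (out.map (fun c => String.ofList [c]))
      = (p.foldl toggleStep out).map (fun c => String.ofList [c]) := by
  induction p with
  | nil => intro out; rfl
  | cons c p ih =>
    intro out
    rw [List.foldl_cons, List.foldl_cons, toggleStepS_map, ih]

theorem odd_out_alt_eq_oddOf (s : String) :
    odd_out_alt s = (oddOf s.toList).map (fun c => String.ofList [c]) := by
  unfold odd_out_alt
  have h0 : ([] : List String) = ([] : List Char).map (fun c => String.ofList [c]) := rfl
  rw [h0, foldlS_eq_map, toggle_foldl]

-- ===== VERDICT (by name: the statement is the Claim_ definition above) =====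
theorem odd_out_spec : Claim_equal_odd_out := by
  intro s _
  unfold Spec_odd_out
  rw [odd_out_eq_oddOf, odd_out_alt_eq_oddOf]
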